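-- pv_equiv track=rewrite | github.com/Actionb/MIZDB | dbentry/utils/text.py | concat_limit
-- ===== SOURCE A (Python) =====
-- from typing import Iterable, Tuple, Union
--
-- def concat_limit(values: Iterable, width: int = 50, sep: str = ", ") -> str:
--     """
--     Join non-empty string values of iterable ``values`` separated by ``sep`` up
--     to a length of ``width``, truncating the remainder.
--
--     Passing width=0 disables the truncation.
--     """
--     results = ''
--     for v in values:
--         if not v:
--             continue
--         item = str(v)
--         if not results:
--             results = item
--             continue
--         if not width or len(results) + len(item) < width:
--             results += sep + item
--         else:
--             results += sep + "[...]"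
--             break
--     return results
-- ===== SOURCE B (Python) =====
-- def concat_limit(values, width=50, sep=", "):
--     items = [str(v) for v in values if v]
--     if not items:
--         return ''
--     if not width:
--         return sep.join(items)
--     cut = None
--     plen = len(items[0])
--     for i in range(1, len(items)):
--         if plen + len(items[i]) >= width:
--             cut = i
--             break
--         plen += len(sep) + len(items[i])
--     if cut is None:
--         return sep.join(items)
--     return sep.join(items[:cut]) + sep + "[...]"
-- ===== Notes on version B (the rewrite author's own statement) =====
-- stated objective: alternative
-- what changed: Replaces A's single running-accumulator loop (build the result string while iterating, break on overflow) by a three-stage decomposition: filter the falsy values, scan prefix lengths to find the first cutoff index, then join the kept items (plus sep + '[...]' if cut).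
import Mathlib
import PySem

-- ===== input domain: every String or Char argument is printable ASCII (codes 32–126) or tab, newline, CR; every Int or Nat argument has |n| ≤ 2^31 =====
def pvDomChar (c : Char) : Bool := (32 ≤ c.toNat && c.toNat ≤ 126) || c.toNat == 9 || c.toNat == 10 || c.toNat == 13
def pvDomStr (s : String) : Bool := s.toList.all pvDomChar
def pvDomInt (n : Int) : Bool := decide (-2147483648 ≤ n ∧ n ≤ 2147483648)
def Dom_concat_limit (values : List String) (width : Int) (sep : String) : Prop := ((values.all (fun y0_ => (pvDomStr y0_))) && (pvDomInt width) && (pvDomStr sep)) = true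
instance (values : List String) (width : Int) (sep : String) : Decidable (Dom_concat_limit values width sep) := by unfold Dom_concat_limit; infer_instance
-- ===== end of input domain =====

-- B replaces A's single running-accumulator loop by filter → prefix-length cutoff scan → join (alternative decomposition, same cost).

def pvBracket : List Char := ['[', '.', '.', '.', ']']

-- ===== PORT A =====
-- A's loop: accumulate `results`, append `sep + item` while short enough, else `sep + "[...]"` and break.
def pvA_loop (vs : List (List Char)) (results : List Char) (width : Int) (sep : List Char) : List Char :=
  match vs with
  | [] => results
  | v :: rest =>
    if v = [] then pvA_loop rest results width sep
    else if results = [] then pvA_loop rest v width sep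
    else if width = 0 ∨ (results.length : Int) + (v.length : Int) < width then
      pvA_loop rest (results ++ (sep ++ v)) width sep
    else results ++ (sep ++ pvBracket)

def concat_limit (values : List String) (width : Int) (sep : String) : String :=
  String.ofList (pvA_loop (values.map String.toList) [] width sep.toList)

-- ===== PORT B =====
-- cutoff scan: index of the first item whose inclusion would reach `width`, given the joined-prefix length `plen`
def pvFindCut (width : Int) (seplen : Nat) (xs : List (List Char)) (plen : Int) : Option Nat :=
  match xs with
  | [] => none
  | x :: rest =>
    if width ≤ plen + (x.length : Int) then some 0
    else (pvFindCut width seplen rest (plen + (seplen : Int) + (x.length : Int))).map (· + 1)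

def concat_limit_alt (values : List String) (width : Int) (sep : String) : String :=
  match (values.map String.toList).filter (· ≠ []) with
  | [] => ""
  | f :: rest =>
    if width = 0 then String.ofList (PySem.Chars.join sep.toList (f :: rest))
    else
      match pvFindCut width sep.toList.length rest (f.length : Int) with
      | none => String.ofList (PySem.Chars.join sep.toList (f :: rest))
      | some k => String.ofList (PySem.Chars.join sep.toList ((f :: rest).take (k + 1)) ++ sep.toList ++ pvBracket)

-- ===== PRECONDITION & SPEC =====
def Spec_concat_limit (values : List String) (width : Int) (sep : String) (out : String) : Prop := out = concat_limit_alt values width sep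
instance (values : List String) (width : Int) (sep : String) (out : String) : Decidable (Spec_concat_limit values width sep out) := by unfold Spec_concat_limit; infer_instance

-- ===== CLAIM (what is proved, stated in full; the proofs are below) =====
def Claim_equal_concat_limit : Prop := ∀ (values : List String) (width : Int) (sep : String), Dom_concat_limit values width sep → Spec_concat_limit values width sep (concat_limit values width sep)

-- ===== LEMMAS AND PROOFS =====

-- fold form of A's accumulation, used to relate both sides
def pvJA (sep : List Char) (r : List Char) (xs : List (List Char)) : List Char :=
  xs.foldl (fun a x => a ++ (sep ++ x)) r

theorem pvJA_append (sep a b : List Char) (xs : List (List Char)) :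
    pvJA sep (a ++ b) xs = a ++ pvJA sep b xs := by
  induction xs generalizing b with
  | nil => rfl
  | cons x xs ih =>
    show pvJA sep ((a ++ b) ++ (sep ++ x)) xs = a ++ pvJA sep (b ++ (sep ++ x)) xs
    rw [List.append_assoc, ih]

theorem pvA_loop_filter (vs : List (List Char)) (r : List Char) (w : Int) (sep : List Char) :
    pvA_loop vs r w sep = pvA_loop (vs.filter (· ≠ [])) r w sep := by
  induction vs generalizing r with
  | nil => rfl
  | cons v rest ih =>
    by_cases hv : v = []
    · subst hv; simp [pvA_loop, ih]
    · rw [List.filter_cons_of_pos (by simpa using hv)]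
      simp only [pvA_loop, if_neg hv]
      split_ifs <;> simp [ih]

theorem pvJoin_eq_JA (sep f : List Char) (rest : List (List Char)) :
    PySem.Chars.join sep (f :: rest) = pvJA sep f rest := by
  induction rest generalizing f with
  | nil => simp [PySem.Chars.join, List.intercalate, pvJA]
  | cons x xs ih =>
    have h : PySem.Chars.join sep (f :: x :: xs) = f ++ (sep ++ PySem.Chars.join sep (x :: xs)) := by
      simp [PySem.Chars.join, List.intercalate, List.intersperse]
    rw [h, ih]
    have h2 : pvJA sep f (x :: xs) = pvJA sep ((f ++ sep) ++ x) xs := by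
      simp [pvJA]
    rw [h2, pvJA_append]
    simp

theorem pvA_loop_zero (sep : List Char) (rest : List (List Char))
    (hall : ∀ x ∈ rest, x ≠ []) (r : List Char) (hr : r ≠ []) :
    pvA_loop rest r 0 sep = pvJA sep r rest := by
  induction rest generalizing r with
  | nil => rfl
  | cons x xs ih =>
    have hx : x ≠ [] := hall x (by simp)
    have h1 : pvA_loop (x :: xs) r 0 sep = pvA_loop xs (r ++ (sep ++ x)) 0 sep := by
      simp [pvA_loop, hx, hr]
    rw [h1, ih (fun y hy => hall y (by simp [hy])) _ (by simp [hr])]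
    simp [pvJA]

theorem pvA_loop_main (sep : List Char) (w : Int) (hw : w ≠ 0) (rest : List (List Char))
    (hall : ∀ x ∈ rest, x ≠ []) (r : List Char) (hr : r ≠ []) :
    pvA_loop rest r w sep =
      match pvFindCut w sep.length rest (r.length : Int) with
      | none => pvJA sep r rest
      | some k => pvJA sep r (rest.take k) ++ (sep ++ pvBracket) := by
  induction rest generalizing r with
  | nil => rfl
  | cons x xs ih =>
    have hx : x ≠ [] := hall x (by simp)
    by_cases hlt : (r.length : Int) + (x.length : Int) < w
    · have hnc : ¬ w ≤ (r.length : Int) + (x.length : Int) := by omega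
      have h1 : pvA_loop (x :: xs) r w sep = pvA_loop xs (r ++ (sep ++ x)) w sep := by
        simp only [pvA_loop]
        rw [if_neg hx, if_neg hr, if_pos (Or.inr hlt)]
      have h2 : pvFindCut w sep.length (x :: xs) (r.length : Int)
          = (pvFindCut w sep.length xs ((r.length : Int) + (sep.length : Int) + (x.length : Int))).map (· + 1) := by
        simp [pvFindCut, hnc]
      have hlen : (((r ++ (sep ++ x)).length : Int)) = (r.length : Int) + (sep.length : Int) + (x.length : Int) := by
        simp; omega
      rw [h1, ih (fun y hy => hall y (by simp [hy])) _ (by simp [hr]), hlen, h2]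
      cases pvFindCut w sep.length xs ((r.length : Int) + (sep.length : Int) + (x.length : Int)) with
      | none => simp [pvJA]
      | some k => simp [pvJA]
    · have hc : w ≤ (r.length : Int) + (x.length : Int) := by omega
      have h1 : pvA_loop (x :: xs) r w sep = r ++ (sep ++ pvBracket) := by
        simp only [pvA_loop]
        rw [if_neg hx, if_neg hr, if_neg (by rintro (h | h) <;> omega)]
      have h2 : pvFindCut w sep.length (x :: xs) (r.length : Int) = some 0 := by
        simp [pvFindCut, hc]
      rw [h1, h2]
      simp [pvJA]

theorem pvMain (values : List String) (width : Int) (sep : String) :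
    concat_limit values width sep = concat_limit_alt values width sep := by
  unfold concat_limit concat_limit_alt
  rw [pvA_loop_filter]
  cases hfl : (values.map String.toList).filter (· ≠ []) with
  | nil => rfl
  | cons f rest =>
    have hmem : ∀ x ∈ f :: rest, x ≠ [] := by
      intro x hx
      have := List.of_mem_filter (hfl ▸ hx)
      simpa using this
    have hf : f ≠ [] := hmem f (by simp)
    have hstep : pvA_loop (f :: rest) [] width sep.toList = pvA_loop rest f width sep.toList := by
      simp [pvA_loop, hf]
    rw [hstep]
    show String.ofList (pvA_loop rest f width sep.toList) =
      (if width = 0 then String.ofList (PySem.Chars.join sep.toList (f :: rest))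
       else
         match pvFindCut width sep.toList.length rest (f.length : Int) with
         | none => String.ofList (PySem.Chars.join sep.toList (f :: rest))
         | some k => String.ofList (PySem.Chars.join sep.toList ((f :: rest).take (k + 1)) ++ sep.toList ++ pvBracket))
    by_cases hw : width = 0
    · subst hw
      rw [if_pos rfl, pvA_loop_zero sep.toList rest (fun x hx => hmem x (by simp [hx])) f hf,
        pvJoin_eq_JA]
    · rw [if_neg hw,
        pvA_loop_main sep.toList width hw rest (fun x hx => hmem x (by simp [hx])) f hf]
      cases pvFindCut width sep.toList.length rest (f.length : Int) with
      | none => simp [pvJoin_eq_JA]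
      | some k =>
        simp only [List.take_succ_cons, pvJoin_eq_JA]
        simp [List.append_assoc]

-- ===== VERDICT (by name: the statement is the Claim_ definition above) =====
theorem concat_limit_spec : Claim_equal_concat_limit := by
  intro values width sep _
  unfold Spec_concat_limit
  exact pvMain values width sep
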